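-- pv_equiv track=rewrite | github.com/IAEA-NDS/exfor-parserpy | exfor_parserpy/exfor_diff.py | postprocess_edit_type
-- ===== SOURCE A (Python) =====
-- def postprocess_edit_type(edit_type, string):
--     edit_type = edit_type.copy()
--     for i in range(len(edit_type) - 1, 0, -1):
--         if edit_type[i] != "i":
--             continue
--         j = i - 1
--         while j >= 0 and edit_type[j] == "i":
--             j -= 1
--         if j >= 0 and string[i] == string[j]:
--             edit_type[i] = "k"
--             edit_type[j] = "i"
--     return edit_type
-- ===== SOURCE B (Python) =====
-- def postprocess_edit_type(edit_type, string):
--     # Precompute the ascending list of non-"i" positions ("anchors"); a monotone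
--     # pointer into it replaces the backward rescan of the original version.
--     out = list(edit_type)
--     anchors = [p for p, t in enumerate(edit_type) if t != "i"]
--     a = len(anchors) - 1
--     for i in range(len(out) - 1, 0, -1):
--         if out[i] != "i":
--             continue
--         while a >= 0 and anchors[a] >= i:
--             a -= 1
--         if a >= 0 and string[i] == string[anchors[a]]:
--             out[i] = "k"
--             out[anchors[a]] = "i"
--             a -= 1
--     return out
-- ===== Notes on version B (the rewrite author's own statement) =====
-- stated objective: alternative
-- what changed: A rescans backwards over the whole run of "i" entries at every insertion cursor; B precomputes the ascending list of non-"i" positions once and walks a single monotone pointer into it, so the inner rescan disappears (worst case O(n) vs O(n^2), not measurably faster on typical inputs).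
import Mathlib
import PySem

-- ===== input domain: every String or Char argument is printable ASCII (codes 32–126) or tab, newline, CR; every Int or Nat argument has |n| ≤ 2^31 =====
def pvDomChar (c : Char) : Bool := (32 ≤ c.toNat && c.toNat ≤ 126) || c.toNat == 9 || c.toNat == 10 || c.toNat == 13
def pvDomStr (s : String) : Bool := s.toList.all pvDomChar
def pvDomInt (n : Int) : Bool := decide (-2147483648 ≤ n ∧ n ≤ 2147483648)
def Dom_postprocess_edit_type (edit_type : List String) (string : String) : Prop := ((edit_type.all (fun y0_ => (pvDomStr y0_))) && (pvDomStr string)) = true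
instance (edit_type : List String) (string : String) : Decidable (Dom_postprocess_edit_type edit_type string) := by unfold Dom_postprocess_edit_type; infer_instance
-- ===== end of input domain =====

-- B precomputes the ascending list of non-"i" positions and walks a monotone pointer into it,
-- replacing A's repeated backward rescans; return-value equivalence is proved.

-- ===== PORT A =====
-- the inner `while j >= 0 and edit_type[j] == "i": j -= 1`
def aScan (et : List String) (j : Int) : Int :=
  if 0 ≤ j ∧ et.getD j.toNat "" = "i" then aScan et (j - 1) else j
termination_by (j + 1).toNat
decreasing_by omega

-- one body of the `for i in range(len(edit_type)-1, 0, -1)` loop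
def aStep (s : List Char) (et : List String) (i : Int) : List String :=
  if et.getD i.toNat "" ≠ "i" then et
  else
    let j := aScan et (i - 1)
    if 0 ≤ j ∧ s.getD i.toNat ' ' = s.getD j.toNat ' ' then
      (et.set i.toNat "k").set j.toNat "i"
    else et

def aLoop (s : List Char) (et : List String) (i : Int) : List String :=
  if i ≤ 0 then et else aLoop s (aStep s et i) (i - 1)
termination_by i.toNat
decreasing_by omega

def postprocess_edit_type (edit_type : List String) (string : String) : List String :=
  aLoop string.toList edit_type ((edit_type.length : Int) - 1)

-- ===== PORT B =====
-- `anchors = [p for p, t in enumerate(edit_type) if t != "i"]`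
def bAnchors (edit_type : List String) : List Int :=
  (PySem.List.enumerate edit_type).filterMap (fun p => if p.2 ≠ "i" then some p.1 else none)

-- `while a >= 0 and anchors[a] >= i: a -= 1`  (the pointer never leaves the list in Python;
-- the getD default -1 is only for totality)
def bPop (anch : List Int) (a i : Int) : Int :=
  if 0 ≤ a ∧ i ≤ anch.getD a.toNat (-1) then bPop anch (a - 1) i else a
termination_by (a + 1).toNat
decreasing_by omega

-- one body of B's for loop, over the state (out, a)
def bStep (s : List Char) (anch : List Int) (st : List String × Int) (i : Int) : List String × Int :=
  if st.1.getD i.toNat "" ≠ "i" then st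
  else
    let a := bPop anch st.2 i
    if 0 ≤ a ∧ s.getD i.toNat ' ' = s.getD (anch.getD a.toNat (-1)).toNat ' ' then
      ((st.1.set i.toNat "k").set (anch.getD a.toNat (-1)).toNat "i", a - 1)
    else (st.1, a)

def postprocess_edit_type_alt (edit_type : List String) (string : String) : List String :=
  let anch := bAnchors edit_type
  ((PySem.List.pyRange ((edit_type.length : Int) - 1) 0 (-1)).foldl
      (bStep string.toList anch) (edit_type, (anch.length : Int) - 1)).1

-- ===== PRECONDITION & SPEC =====
-- Pre_ excludes exactly the inputs where Python A (and B alike) raises IndexError: an "i" entry at an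
-- index k ≥ len(string), k ≥ 1, whose scan finds some non-"i" entry below, reaches `string[k]`.
def Pre_postprocess_edit_type (edit_type : List String) (string : String) : Prop :=
  ∀ k ∈ List.range edit_type.length,
    (1 ≤ k ∧ string.toList.length ≤ k ∧ edit_type.getD k "" = "i") →
      ∀ m ∈ List.range k, edit_type.getD m "" = "i"

instance (edit_type : List String) (string : String) : Decidable (Pre_postprocess_edit_type edit_type string) := by
  unfold Pre_postprocess_edit_type; infer_instance

def pvWitness_postprocess_edit_type : List String × String := (["k", "i"], "aa")

def Spec_postprocess_edit_type (edit_type : List String) (string : String) (out : List String) : Prop := out = postprocess_edit_type_alt edit_type string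
instance (edit_type : List String) (string : String) (out : List String) : Decidable (Spec_postprocess_edit_type edit_type string out) := by unfold Spec_postprocess_edit_type; infer_instance

-- ===== CLAIM (what is proved, stated in full; the proofs are below) =====
def Claim_equal_postprocess_edit_type : Prop := ∀ (edit_type : List String) (string : String), Dom_postprocess_edit_type edit_type string → Pre_postprocess_edit_type edit_type string → Spec_postprocess_edit_type edit_type string (postprocess_edit_type edit_type string)

-- ===== LEMMAS AND PROOFS =====

-- unrolling lemmas for pyRange with step -1
lemma pyRange_neg_cons (a b : Int) (h : b < a) :
    PySem.List.pyRange a b (-1) = a :: PySem.List.pyRange (a - 1) b (-1) := by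
  simp only [PySem.List.pyRange]
  norm_num
  rw [if_pos h]
  by_cases h2 : b < a - 1
  · rw [if_pos h2]
    have hn : (a - b).toNat = (a - 1 - b).toNat + 1 := by omega
    rw [hn, List.range_succ_eq_map, List.map_cons, List.map_map]
    congr 1
    · norm_num
    · apply List.map_congr_left
      intro k _
      simp [Function.comp]
      ring
  · rw [if_neg h2]
    have hn : (a - b).toNat = 1 := by omega
    simp [hn, List.range_succ]

lemma pyRange_neg_nil (a b : Int) (h : a ≤ b) : PySem.List.pyRange a b (-1) = [] := by
  simp only [PySem.List.pyRange]
  norm_num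
  intro h2
  omega

-- A-side: characterisation of the backward scan
lemma aScan_eq_of_all_i (et : List String) (j j2 : Int) (hge : -1 ≤ j2) (hle : j2 ≤ j)
    (hall : ∀ m : Nat, j2 < (m : Int) → (m : Int) ≤ j → et.getD m "" = "i") :
    aScan et j = aScan et j2 := by
  have hd : ∀ n : Nat, ∀ j : Int, (j + 1).toNat = n → j2 ≤ j →
      (∀ m : Nat, j2 < (m : Int) → (m : Int) ≤ j → et.getD m "" = "i") →
      aScan et j = aScan et j2 := by
    intro n
    induction n with
    | zero => intro j hn hle hall; exact congrArg (aScan et) (by omega)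
    | succ n ih =>
        intro j hn hle hall
        rcases eq_or_lt_of_le hle with heq | hlt
        · rw [heq]
        · rw [aScan]
          have hj0 : 0 ≤ j := by omega
          rw [if_pos ⟨hj0, hall j.toNat (by omega) (by omega)⟩]
          exact ih (j - 1) (by omega) (by omega) (fun m hm hmj => hall m hm (by omega))
  exact hd (j + 1).toNat j rfl hle hall

-- B-side: static facts about the anchor list
lemma mem_bAnchors (et : List String) (x : Int) :
    x ∈ bAnchors et ↔ ∃ k : Nat, k < et.length ∧ x = (k : Int) ∧ et.getD k "" ≠ "i" := by
  unfold bAnchors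
  rw [List.mem_filterMap]
  constructor
  · rintro ⟨p, hp, hf⟩
    rw [PySem.List.mem_enumerate_iff] at hp
    obtain ⟨k, hk, hpk⟩ := hp
    subst hpk
    by_cases hi : et[k] ≠ "i"
    · rw [if_pos hi] at hf
      refine ⟨k, hk, ?_, ?_⟩
      · simpa using hf.symm
      · rw [List.getD_eq_getElem _ _ hk]; exact hi
    · rw [if_neg hi] at hf; exact absurd hf (by simp)
  · rintro ⟨k, hk, hx, hne⟩
    refine ⟨((k : Int), et[k]), ?_, ?_⟩
    · rw [PySem.List.mem_enumerate_iff]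
      exact ⟨k, hk, by simp⟩
    · rw [List.getD_eq_getElem _ _ hk] at hne
      simp [hne, hx]

lemma bAnchors_pairwise (et : List String) : (bAnchors et).Pairwise (· < ·) := by
  unfold bAnchors
  refine List.Pairwise.filterMap _ ?_ (PySem.List.pairwise_lt_enumerate et 0)
  intro p q hpq b hb b' hb'
  by_cases h1 : p.2 ≠ "i"
  · by_cases h2 : q.2 ≠ "i"
    · rw [if_pos h1] at hb; rw [if_pos h2] at hb'
      have hb1 : b = p.1 := by simpa using hb.symm
      have hb2 : b' = q.1 := by simpa using hb'.symm
      rw [hb1, hb2]; exact hpq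
    · rw [if_neg h2] at hb'; exact absurd hb' (by simp)
  · rw [if_neg h1] at hb; exact absurd hb (by simp)

lemma bAnchors_nonneg (et : List String) : ∀ x ∈ bAnchors et, 0 ≤ x := by
  intro x hx
  obtain ⟨k, _, hx, _⟩ := (mem_bAnchors et x).mp hx
  omega

lemma anch_mono (anch : List Int) (hpw : anch.Pairwise (· < ·))
    (i1 i2 : Nat) (h1 : i1 ≤ i2) (h2 : i2 < anch.length) :
    anch.getD i1 (-1) ≤ anch.getD i2 (-1) := by
  rcases eq_or_lt_of_le h1 with heq | hlt
  · rw [heq]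
  · rw [List.getD_eq_getElem _ _ (by omega), List.getD_eq_getElem _ _ h2]
    exact le_of_lt (List.pairwise_iff_getElem.mp hpw i1 i2 (by omega) h2 hlt)

-- B-side: characterisation of the pop loop
lemma bPop_le (anch : List Int) (a i : Int) : bPop anch a i ≤ a := by
  fun_induction bPop anch a i with
  | case1 a h ih => omega
  | case2 a h => omega

lemma bPop_stop (anch : List Int) (a i : Int) :
    bPop anch a i < 0 ∨ anch.getD (bPop anch a i).toNat (-1) < i := by
  fun_induction bPop anch a i with
  | case1 a h ih => exact ih
  | case2 a h =>
      by_cases h0 : 0 ≤ a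
      · right
        by_contra hc
        exact h ⟨h0, by omega⟩
      · left; omega

lemma bPop_between (anch : List Int) (a i : Int) :
    ∀ b : Int, bPop anch a i < b → b ≤ a → i ≤ anch.getD b.toNat (-1) := by
  fun_induction bPop anch a i with
  | case1 a h ih =>
      intro b hb1 hb2
      rcases eq_or_lt_of_le hb2 with heq | hlt
      · subst heq; exact h.2
      · exact ih b hb1 (by omega)
  | case2 a h => intro b hb1 hb2; omega

lemma bPop_between' (anch : List Int) (a i : Int) (idx : Nat)
    (h1 : bPop anch a i < (idx : Int)) (h2 : (idx : Int) ≤ a) :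
    i ≤ anch.getD idx (-1) := by
  have h := bPop_between anch a i idx h1 h2
  simpa using h

-- the loop invariant: the pointer a is below the list length and anch[0..a] is exactly
-- the set of non-"i" positions of `out` strictly below the cursor i
def InvB (out : List String) (anch : List Int) (a i : Int) : Prop :=
  a < (anch.length : Int) ∧
  (∀ x ∈ anch, x < (out.length : Int)) ∧
  ∀ m : Nat, (m : Int) < i →
    (out.getD m "" ≠ "i" ↔ ∃ idx : Nat, (idx : Int) ≤ a ∧ anch.getD idx (-1) = (m : Int))

-- after the pop, the pointer designates A's scan result (or both report "nothing below")
lemma find_eq (out : List String) (anch : List Int) (a i : Int)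
    (hpw : anch.Pairwise (· < ·)) (hnn : ∀ x ∈ anch, 0 ≤ x)
    (hinv : InvB out anch a i) (hi : 0 < i) :
    (0 ≤ bPop anch a i → aScan out (i - 1) = anch.getD (bPop anch a i).toNat (-1)) ∧
    (bPop anch a i < 0 → aScan out (i - 1) < 0) := by
  obtain ⟨halen, hbnd, hstate⟩ := hinv
  set a' := bPop anch a i with ha'
  have ha'le : a' ≤ a := bPop_le anch a i
  constructor
  · intro hpos
    have ha'len : a'.toNat < anch.length := by omega
    set j := anch.getD a'.toNat (-1) with hj
    have hjmem : j ∈ anch := by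
      rw [hj, List.getD_eq_getElem _ _ ha'len]; exact List.getElem_mem _
    have hj0 : 0 ≤ j := hnn j hjmem
    have hji : j < i := by
      rcases bPop_stop anch a i with h | h
      · omega
      · exact h
    have hjne : out.getD j.toNat "" ≠ "i" := by
      have h := hstate j.toNat (by omega)
      rw [show ((j.toNat : Nat) : Int) = j by omega] at h
      exact h.mpr ⟨a'.toNat, by omega, by rw [← hj]⟩
    have hall : ∀ m : Nat, j < (m : Int) → (m : Int) ≤ i - 1 → out.getD m "" = "i" := by
      intro m hm hmi
      by_contra hc
      obtain ⟨idx, hidx, hidxv⟩ := (hstate m (by omega)).mp hc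
      have hidxlen : idx < anch.length := by
        by_contra hbig
        rw [List.getD_eq_default _ _ (by omega)] at hidxv
        omega
      by_cases hcmp : (idx : Int) ≤ a'
      · have := anch_mono anch hpw idx a'.toNat (by omega) ha'len
        omega
      · have := bPop_between' anch a i idx (by omega) hidx
        omega
    have h1 : aScan out (i - 1) = aScan out j :=
      aScan_eq_of_all_i out (i - 1) j (by omega) (by omega) hall
    have h2 : aScan out j = j := by
      rw [aScan, if_neg]
      intro hc
      exact hjne hc.2
    rw [h1, h2]
  · intro hneg
    have hall : ∀ m : Nat, (-1 : Int) < (m : Int) → (m : Int) ≤ i - 1 → out.getD m "" = "i" := by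
      intro m _ hmi
      by_contra hc
      obtain ⟨idx, hidx, hidxv⟩ := (hstate m (by omega)).mp hc
      have hidxlen : idx < anch.length := by
        by_contra hbig
        rw [List.getD_eq_default _ _ (by omega)] at hidxv
        omega
      have := bPop_between' anch a i idx (by omega) hidx
      omega
    have h1 : aScan out (i - 1) = aScan out (-1) :=
      aScan_eq_of_all_i out (i - 1) (-1) (by omega) (by omega) hall
    rw [h1, aScan, if_neg (by omega)]
    omega

-- one step of B computes one step of A and preserves the invariant
lemma step_eqB (s : List Char) (out : List String) (anch : List Int) (a i : Int)
    (hpw : anch.Pairwise (· < ·)) (hnn : ∀ x ∈ anch, 0 ≤ x)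
    (hinv : InvB out anch a i) (hi : 0 < i) :
    (bStep s anch (out, a) i).1 = aStep s out i ∧
    InvB (aStep s out i) anch (bStep s anch (out, a) i).2 (i - 1) := by
  obtain ⟨halen, hbnd, hstate⟩ := hinv
  unfold bStep aStep
  by_cases hne : out.getD i.toNat "" ≠ "i"
  · rw [if_pos hne, if_pos hne]
    exact ⟨rfl, by omega, hbnd, fun m hm => hstate m (by omega)⟩
  · rw [if_neg hne, if_neg hne]
    obtain ⟨hfind1, hfind2⟩ := find_eq out anch a i hpw hnn ⟨halen, hbnd, hstate⟩ hi
    set a' := bPop anch a i with ha'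
    have ha'le : a' ≤ a := bPop_le anch a i
    simp only []
    by_cases hpos : 0 ≤ a'
    · have ha'len : a'.toNat < anch.length := by omega
      set j := anch.getD a'.toNat (-1) with hj
      have hjmem : j ∈ anch := by
        rw [hj, List.getD_eq_getElem _ _ ha'len]; exact List.getElem_mem _
      have hj0 : 0 ≤ j := hnn j hjmem
      have hji : j < i := by
        rcases bPop_stop anch a i with h | h
        · omega
        · exact h
      have hscan : aScan out (i - 1) = j := hfind1 hpos
      rw [hscan]
      by_cases hch : s.getD i.toNat ' ' = s.getD j.toNat ' '
      · rw [if_pos ⟨hpos, hch⟩, if_pos ⟨hj0, hch⟩]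
        refine ⟨rfl, by omega, by simpa using hbnd, ?_⟩
        intro m hm
        have hmne_i : m ≠ i.toNat := by omega
        by_cases hmj : (m : Int) = j
        · have hmjn : m = j.toNat := by omega
          have hjlen : j.toNat < out.length := by
            have := hbnd j hjmem
            omega
          constructor
          · intro hc
            exfalso
            apply hc
            rw [hmjn]
            have : j.toNat < ((out.set i.toNat "k").set j.toNat "i").length := by simpa using hjlen
            rw [List.getD_eq_getElem _ _ this]
            simp
          · rintro ⟨idx, hidx, hidxv⟩
            exfalso
            have hidxlen : idx < anch.length := by
              by_contra hbig
              rw [List.getD_eq_default _ _ (by omega)] at hidxv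
              omega
            have := anch_mono anch hpw idx a'.toNat (by omega) ha'len
            have hlt : anch.getD idx (-1) < anch.getD a'.toNat (-1) := by
              rw [List.getD_eq_getElem _ _ hidxlen, List.getD_eq_getElem _ _ ha'len]
              exact List.pairwise_iff_getElem.mp hpw idx a'.toNat hidxlen ha'len (by omega)
            omega
        · have houtm : ((out.set i.toNat "k").set j.toNat "i").getD m "" = out.getD m "" := by
            have h1 : m ≠ j.toNat := by omega
            simp [List.getD, Ne.symm h1, Ne.symm hmne_i]
          rw [houtm]
          rw [hstate m (by omega)]
          constructor
          · rintro ⟨idx, hidx, hidxv⟩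
            refine ⟨idx, ?_, hidxv⟩
            have hidxlen : idx < anch.length := by
              by_contra hbig
              rw [List.getD_eq_default _ _ (by omega)] at hidxv
              omega
            by_cases hcmp : (idx : Int) ≤ a' - 1
            · exact hcmp
            · exfalso
              by_cases heqa : (idx : Int) = a'
              · apply hmj
                rw [← hidxv, hj]
                congr 1
                omega
              · have := bPop_between' anch a i idx (by omega) hidx
                omega
          · rintro ⟨idx, hidx, hidxv⟩
            exact ⟨idx, by omega, hidxv⟩
      · rw [if_neg (fun hc => hch hc.2), if_neg (fun hc => hch hc.2)]
        refine ⟨rfl, by omega, hbnd, ?_⟩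
        intro m hm
        rw [hstate m (by omega)]
        constructor
        · rintro ⟨idx, hidx, hidxv⟩
          refine ⟨idx, ?_, hidxv⟩
          have hidxlen : idx < anch.length := by
            by_contra hbig
            rw [List.getD_eq_default _ _ (by omega)] at hidxv
            omega
          by_cases hcmp : (idx : Int) ≤ a'
          · exact hcmp
          · exfalso
            have := bPop_between' anch a i idx (by omega) hidx
            omega
        · rintro ⟨idx, hidx, hidxv⟩
          exact ⟨idx, by omega, hidxv⟩
    · have hscan : aScan out (i - 1) < 0 := hfind2 (by omega)
      rw [if_neg (fun hc => absurd hc.1 (by omega)),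
          if_neg (fun hc => absurd hc.1 (by omega))]
      refine ⟨rfl, by omega, hbnd, ?_⟩
      intro m hm
      rw [hstate m (by omega)]
      constructor
      · rintro ⟨idx, hidx, hidxv⟩
        exfalso
        have hidxlen : idx < anch.length := by
          by_contra hbig
          rw [List.getD_eq_default _ _ (by omega)] at hidxv
          omega
        have := bPop_between' anch a i idx (by omega) hidx
        omega
      · rintro ⟨idx, hidx, _⟩
        omega

-- B's fold over range(i, 0, -1) computes A's loop
lemma loop_eqB (s : List Char) (anch : List Int)
    (hpw : anch.Pairwise (· < ·)) (hnn : ∀ x ∈ anch, 0 ≤ x) :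
    ∀ n : Nat, ∀ i : Int, i.toNat = n → ∀ out a, InvB out anch a i →
      ((PySem.List.pyRange i 0 (-1)).foldl (bStep s anch) (out, a)).1 = aLoop s out i := by
  intro n
  induction n using Nat.strong_induction_on with
  | _ n ih =>
    intro i hn out a hinv
    by_cases hi : i ≤ 0
    · rw [pyRange_neg_nil i 0 hi, aLoop, if_pos hi]
      rfl
    · obtain ⟨hstep1, hstep2⟩ := step_eqB s out anch a i hpw hnn hinv (by omega)
      rw [pyRange_neg_cons i 0 (by omega), List.foldl_cons, aLoop, if_neg hi]
      have hpair : bStep s anch (out, a) i =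
          ((bStep s anch (out, a) i).1, (bStep s anch (out, a) i).2) := rfl
      rw [hpair, hstep1]
      exact ih (i - 1).toNat (by omega) (i - 1) rfl _ _ hstep2

-- the initial pointer/anchor state satisfies the invariant
lemma invB_init (et : List String) :
    InvB et (bAnchors et) (((bAnchors et).length : Int) - 1) ((et.length : Int) - 1) := by
  refine ⟨by omega, ?_, ?_⟩
  · intro x hx
    obtain ⟨k, hk, hxk, _⟩ := (mem_bAnchors et x).mp hx
    omega
  · intro m hm
    have hmlen : m < et.length := by omega
    constructor
    · intro hne
      have hmem : ((m : Int)) ∈ bAnchors et := (mem_bAnchors et m).mpr ⟨m, hmlen, rfl, hne⟩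
      obtain ⟨idx, hidx, hval⟩ := List.getElem_of_mem hmem
      exact ⟨idx, by omega, by rw [List.getD_eq_getElem _ _ hidx]; exact hval⟩
    · rintro ⟨idx, hidx, hval⟩
      have hidxlen : idx < (bAnchors et).length := by
        by_contra hbig
        rw [List.getD_eq_default _ _ (by omega)] at hval
        omega
      have hmem : ((m : Int)) ∈ bAnchors et := by
        rw [← hval, List.getD_eq_getElem _ _ hidxlen]
        exact List.getElem_mem _
      obtain ⟨k, _, hk, hkne⟩ := (mem_bAnchors et _).mp hmem
      have : k = m := by omega
      subst this
      exact hkne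

-- ===== VERDICT (by name: the statement is the Claim_ definition above) =====
theorem postprocess_edit_type_spec : Claim_equal_postprocess_edit_type := by
  intro edit_type string _ _
  unfold Spec_postprocess_edit_type postprocess_edit_type postprocess_edit_type_alt
  exact (loop_eqB string.toList (bAnchors edit_type)
    (bAnchors_pairwise edit_type) (bAnchors_nonneg edit_type)
    ((edit_type.length : Int) - 1).toNat ((edit_type.length : Int) - 1) rfl
    edit_type _ (invB_init edit_type)).symm
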